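-- pv_equiv track=rewrite | github.com/RoPeak/mediashrink | mediashrink/cli.py | _group_incompatibility_details
-- ===== SOURCE A (Python) =====
-- def _group_incompatibility_details(details: list[str]) -> list[str]:
--     grouped: dict[str, list[str]] = {}
--     for detail in details:
--         name, _, reason = detail.partition(": ")
--         label = reason or detail
--         grouped.setdefault(label, []).append(name or detail)
--     summaries: list[str] = []
--     for reason, names in sorted(grouped.items(), key=lambda item: (-len(item[1]), item[0])):
--         examples = ", ".join(names[:3])
--         summary = f"{len(names)} file(s): {reason}"
--         if examples:
--             summary += f" ({examples})"
--         summaries.append(summary)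
--     return summaries
-- ===== SOURCE B (Python) =====
-- def _group_incompatibility_details(details: list[str]) -> list[str]:
--     # Two-pass grouping: normalise each detail to a (label, name) pair, take the
--     # distinct labels in first-appearance order, then collect each label's names
--     # with a per-label filter pass (no dict-driven accumulation).
--     pairs = []
--     for detail in details:
--         name, _, reason = detail.partition(": ")
--         pairs.append((reason or detail, name or detail))
--     labels = list(dict.fromkeys(label for label, _ in pairs))
--     groups = [(label, [n for l, n in pairs if l == label]) for label in labels]
--     groups.sort(key=lambda g: (-len(g[1]), g[0]))
--     out = []
--     for reason, names in groups:
--         examples = ", ".join(names[:3])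
--         base = f"{len(names)} file(s): {reason}"
--         out.append(base + (f" ({examples})" if examples else ""))
--     return out
-- ===== Notes on version B (the rewrite author's own statement) =====
-- stated objective: alternative
-- what changed: Replaces A's single-pass dict (setdefault/append) accumulation with a two-pass grouping: normalise details to (label, name) pairs, dedup the labels in first-appearance order, then gather each label's names with a per-label filter pass before the same final sort and formatting.
import Mathlib
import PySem

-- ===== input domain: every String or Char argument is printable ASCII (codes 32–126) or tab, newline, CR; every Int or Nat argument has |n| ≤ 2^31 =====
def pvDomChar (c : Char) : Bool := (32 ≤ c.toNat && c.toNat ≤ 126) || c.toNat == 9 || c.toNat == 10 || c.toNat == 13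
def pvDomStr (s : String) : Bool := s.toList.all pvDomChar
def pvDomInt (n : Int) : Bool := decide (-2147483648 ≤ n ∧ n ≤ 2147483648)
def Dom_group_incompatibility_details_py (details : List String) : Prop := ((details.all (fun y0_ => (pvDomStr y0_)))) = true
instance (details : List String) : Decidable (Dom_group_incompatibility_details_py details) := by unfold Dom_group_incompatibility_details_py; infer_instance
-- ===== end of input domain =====

-- B replaces A's single-pass dict accumulation by a two-pass grouping (dedup the
-- labels in first-appearance order, then collect each label's names with a filter
-- pass); same output, objective: alternative decomposition, not faster.

-- shared port of the Python builtin str.partition(sep): (before, sep, after) of the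
-- FIRST occurrence, (s, "", "") if absent — exact via PySem.Str.find/slice/len
def pyPartition (s sep : String) : String × String × String :=
  let i := PySem.Str.find s sep
  if i = -1 then (s, "", "")
  else (PySem.Str.slice s (some 0) (some i), sep,
        PySem.Str.slice s (some (i + PySem.Str.len sep)) none)

-- ===== PORT A =====
-- grouped.setdefault(label, []).append(x) mutates the list stored at label in
-- place, i.e. grouped[label] = grouped.get(label, []) + [x]: ported as Dict.modify
def group_incompatibility_details_py (details : List String) : List String :=
  let grouped : PySem.Dict String (List String) :=
    details.foldl (fun grouped detail =>
      let p := pyPartition detail ": "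
      let name := p.1
      let reason := p.2.2
      let label := if reason == "" then detail else reason      -- reason or detail
      grouped.modify label [] (fun ns => ns ++ [if name == "" then detail else name]))
      PySem.Dict.empty
  let sortedItems :=
    PySem.List.sorted2 grouped.items (fun it => -(it.2.length : Int)) (fun it => it.1)
  sortedItems.foldl (fun summaries it =>
    let examples := PySem.Str.join ", " (PySem.List.slice it.2 none (some 3))
    let summary := PySem.Int.toStr (it.2.length : Int) ++ " file(s): " ++ it.1
    let summary := if examples == "" then summary else summary ++ " (" ++ examples ++ ")"
    summaries ++ [summary]) []

-- ===== PORT B =====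
def group_incompatibility_details_py_alt (details : List String) : List String :=
  let pairs := details.map (fun detail =>
    let p := pyPartition detail ": "
    ((if p.2.2 == "" then detail else p.2.2), (if p.1 == "" then detail else p.1)))
  let labels := PySem.List.dedup (pairs.map (fun q => q.1))   -- list(dict.fromkeys(…))
  let groups := labels.map (fun label =>
    (label, (pairs.filter (fun q => q.1 == label)).map (fun q => q.2)))
  let sortedGroups :=
    PySem.List.sorted2 groups (fun g => -(g.2.length : Int)) (fun g => g.1)
  sortedGroups.map (fun g =>
    let examples := PySem.Str.join ", " (PySem.List.slice g.2 none (some 3))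
    let summary := PySem.Int.toStr (g.2.length : Int) ++ " file(s): " ++ g.1
    if examples == "" then summary else summary ++ " (" ++ examples ++ ")")

-- ===== PRECONDITION & SPEC =====
def Spec_group_incompatibility_details_py (details : List String) (out : List String) : Prop := out = group_incompatibility_details_py_alt details
instance (details : List String) (out : List String) : Decidable (Spec_group_incompatibility_details_py details out) := by unfold Spec_group_incompatibility_details_py; infer_instance

-- ===== CLAIM (what is proved, stated in full; the proofs are below) =====
def Claim_equal_group_incompatibility_details_py : Prop := ∀ (details : List String), Dom_group_incompatibility_details_py details → Spec_group_incompatibility_details_py details (group_incompatibility_details_py details)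

-- ===== LEMMAS AND PROOFS =====

-- the (label, name) pair A's loop computes from one detail
def pvPairOf (detail : String) : String × String :=
  let p := pyPartition detail ": "
  ((if p.2.2 == "" then detail else p.2.2), (if p.1 == "" then detail else p.1))

-- a foldl that appends one image per element is a map
theorem pv_foldl_append {α β : Type} (f : α → β) :
    ∀ (l : List α) (a : List β),
      l.foldl (fun acc x => acc ++ [f x]) a = a ++ l.map f := by
  intro l
  induction l with
  | nil => intro a; simp
  | cons x t ih => intro a; simp [List.foldl_cons, ih]

-- A's grouping dict, characterised: items = labels deduped in first-appearance
-- order, each paired with the names of its pairs in original order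
theorem pv_items_grouped (ps : List (String × String)) :
    (ps.foldl (fun (d : PySem.Dict String (List String)) p =>
        d.modify p.1 [] (fun ns => ns ++ [p.2])) PySem.Dict.empty).items
      = (PySem.List.dedup (ps.map (fun q => q.1))).map
          (fun l => (l, (ps.filter (fun q => q.1 == l)).map (fun q => q.2))) := by
  set d := ps.foldl (fun (d : PySem.Dict String (List String)) p =>
      d.modify p.1 [] (fun ns => ns ++ [p.2])) PySem.Dict.empty with hd
  have hkeys : d.keys = PySem.Set.ofList (ps.map (fun q => q.1)) := by
    rw [hd]
    have := PySem.Dict.keys_foldl_modify_key ps (fun p => p.1) []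
      (fun _ p => (fun ns => ns ++ [p.2])) (PySem.Dict.empty (κ := String) (ν := List String))
    simpa [PySem.Dict.keys_empty, PySem.Set.ofList] using this
  have hnodup : d.keys.Nodup := by
    rw [hd]
    exact PySem.Dict.nodup_keys_foldl_modify_key ps (fun p => p.1) []
      (fun _ p => (fun ns => ns ++ [p.2])) _ (by simp [PySem.Dict.keys_empty])
  have hgetD : ∀ l, d.getD l [] = (ps.filter (fun q => q.1 == l)).map (fun q => q.2) := by
    intro l
    rw [hd]
    simpa [PySem.Dict.getD_empty] using
      PySem.Dict.getD_foldl_modify_append ps (PySem.Dict.empty (κ := String) (ν := List String)) l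
  rw [PySem.Dict.items_eq_map_keys d hnodup [], hkeys, PySem.List.dedup_eq_ofList]
  exact List.map_congr_left (fun l _ => by rw [hgetD l])

-- ===== VERDICT (by name: the statement is the Claim_ definition above) =====
theorem group_incompatibility_details_py_spec : Claim_equal_group_incompatibility_details_py := by
  intro details _
  show group_incompatibility_details_py details = group_incompatibility_details_py_alt details
  unfold group_incompatibility_details_py group_incompatibility_details_py_alt
  have hbody : (fun (grouped : PySem.Dict String (List String)) detail =>
      let p := pyPartition detail ": "
      let name := p.1
      let reason := p.2.2
      let label := if reason == "" then detail else reason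
      grouped.modify label [] (fun ns => ns ++ [if name == "" then detail else name]))
    = (fun (d : PySem.Dict String (List String)) detail =>
        d.modify (pvPairOf detail).1 [] (fun ns => ns ++ [(pvPairOf detail).2])) := by
    funext d detail
    rfl
  have hfold : details.foldl (fun (grouped : PySem.Dict String (List String)) detail =>
      let p := pyPartition detail ": "
      let name := p.1
      let reason := p.2.2
      let label := if reason == "" then detail else reason
      grouped.modify label [] (fun ns => ns ++ [if name == "" then detail else name]))
      PySem.Dict.empty
    = (details.map pvPairOf).foldl (fun (d : PySem.Dict String (List String)) p =>
        d.modify p.1 [] (fun ns => ns ++ [p.2])) PySem.Dict.empty := by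
    rw [hbody, List.foldl_map]
  have hp2 : (fun detail =>
      let p := pyPartition detail ": "
      ((if p.2.2 == "" then detail else p.2.2), (if p.1 == "" then detail else p.1)))
      = pvPairOf := rfl
  simp only [hp2, hfold, pv_items_grouped]
  rw [pv_foldl_append]
  simp
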